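-- pv_equiv track=rewrite | github.com/techiaith/macsen-sgwrsfot | server/assistant/nlp/cy/lemmatization.py | nasal_mutate
-- ===== SOURCE A (Python) =====
-- def nasal_mutate(word):
--     mutable_letters = set(("b", "c", "d", "g", "p", "t"))
--     nasal_map = [("b", "m"), ("ch", "ch"), ("c", "ngh"), ("dd", "dd"), ("d", "n"), ("g", "ng"), ("p", "mh"), ("g", "ng"), ("th", "th"), ("t", "nh")]
--     for mutable_letter in mutable_letters:
--         if word.startswith(mutable_letter):
--             for mutation in nasal_map:
--                 if word.startswith(mutation[0]):
--                     mutated_word = mutation[1] + word[(len(mutation[0])):]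
--                     return mutated_word
--     return word
-- ===== SOURCE B (Python) =====
-- def nasal_mutate(word):
--     for d in ("ch", "dd", "th"):
--         if word.startswith(d):
--             return word
--     mapping = {"b": "m", "c": "ngh", "d": "n", "g": "ng", "p": "mh", "t": "nh"}
--     first = word[:1]
--     if first in mapping:
--         return mapping[first] + word[1:]
--     return word
-- ===== Notes on version B (the rewrite author's own statement) =====
-- stated objective: simpler
-- what changed: A's outer loop over a set of mutable letters plus an ordered linear scan of a 10-entry prefix list is re-decomposed into a 3-element digraph-protection check followed by a single O(1) dict lookup on the first character.
import Mathlib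
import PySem

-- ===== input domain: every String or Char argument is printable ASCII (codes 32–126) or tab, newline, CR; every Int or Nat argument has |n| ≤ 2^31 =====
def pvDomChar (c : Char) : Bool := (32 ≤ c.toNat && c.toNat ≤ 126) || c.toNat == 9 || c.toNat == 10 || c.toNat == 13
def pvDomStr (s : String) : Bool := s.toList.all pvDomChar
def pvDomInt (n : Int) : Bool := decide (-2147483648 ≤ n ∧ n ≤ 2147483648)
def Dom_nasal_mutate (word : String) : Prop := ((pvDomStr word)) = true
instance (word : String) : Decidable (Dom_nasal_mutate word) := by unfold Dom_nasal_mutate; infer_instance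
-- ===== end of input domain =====

-- B replaces A's set-scan plus ordered 10-entry prefix list by a 3-digraph protection pass and one
-- dict lookup on the first character (simpler). Strings are ported on their code-point lists (PySem.Chars), exact.

-- ===== PORT A =====
-- inner loop: 'for mutation in nasal_map: if word.startswith(mutation[0]): return mutation[1] + word[len(mutation[0]):]'
def nmScanMap (w : List Char) : List (List Char × List Char) → Option (List Char)
  | [] => none
  | m :: rest =>
    if PySem.Chars.startswith w m.1 then
      some (m.2 ++ PySem.List.slice w (some (m.1.length : Int)) none)
    else nmScanMap w rest

-- outer loop: 'for mutable_letter in mutable_letters: if word.startswith(mutable_letter): <inner loop>'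
def nmOuter (w : List Char) (nmap : List (List Char × List Char)) : List (List Char) → Option (List Char)
  | [] => none
  | l :: rest =>
    if PySem.Chars.startswith w l then
      match nmScanMap w nmap with
      | some r => some r
      | none => nmOuter w nmap rest
    else nmOuter w nmap rest

-- NOTE: CPython iterates the set in an unspecified (hash-dependent) order; the result is
-- order-independent because the six single-letter prefixes are mutually exclusive, so we
-- iterate in PySem.Set.ofList's (insertion) order.
def nmA (w : List Char) : List Char :=
  let mutable_letters : PySem.Set (List Char) := PySem.Set.ofList [['b'], ['c'], ['d'], ['g'], ['p'], ['t']]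
  let nasal_map : List (List Char × List Char) :=
    [(['b'], ['m']), (['c','h'], ['c','h']), (['c'], ['n','g','h']), (['d','d'], ['d','d']), (['d'], ['n']),
     (['g'], ['n','g']), (['p'], ['m','h']), (['g'], ['n','g']), (['t','h'], ['t','h']), (['t'], ['n','h'])]
  match nmOuter w nasal_map mutable_letters with
  | some r => r
  | none => w

def nasal_mutate (word : String) : String := String.ofList (nmA word.toList)

-- ===== PORT B =====
-- 'for d in ("ch","dd","th"): if word.startswith(d): return word'
def nmDigraph (w : List Char) : List (List Char) → Option (List Char)
  | [] => none
  | d :: rest => if PySem.Chars.startswith w d then some w else nmDigraph w rest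

def nmB (w : List Char) : List Char :=
  match nmDigraph w [['c','h'], ['d','d'], ['t','h']] with
  | some r => r
  | none =>
    let mapping : PySem.Dict (List Char) (List Char) :=
      PySem.Dict.ofList [(['b'], ['m']), (['c'], ['n','g','h']), (['d'], ['n']),
                         (['g'], ['n','g']), (['p'], ['m','h']), (['t'], ['n','h'])]
    let first := PySem.List.slice w none (some 1)
    match PySem.Dict.get? mapping first with
    | some rep => rep ++ PySem.List.slice w (some 1) none
    | none => w

def nasal_mutate_alt (word : String) : String := String.ofList (nmB word.toList)

-- ===== PRECONDITION & SPEC =====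
def Spec_nasal_mutate (word : String) (out : String) : Prop := out = nasal_mutate_alt word
instance (word : String) (out : String) : Decidable (Spec_nasal_mutate word out) := by unfold Spec_nasal_mutate; infer_instance

-- ===== CLAIM (what is proved, stated in full; the proofs are below) =====
def Claim_equal_nasal_mutate : Prop := ∀ (word : String), Dom_nasal_mutate word → Spec_nasal_mutate word (nasal_mutate word)

-- ===== LEMMAS AND PROOFS =====

-- both programs agree on every code-point list
set_option maxHeartbeats 2000000 in
theorem nmA_eq_nmB : ∀ cs, nmA cs = nmB cs := by
  have h1 : ∀ (xs : List Char), PySem.List.slice xs (some (1:Int)) none = xs.drop 1 := fun xs => by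
    simpa using PySem.List.slice_from xs (a := 1) (by norm_num)
  have h2 : ∀ (xs : List Char), PySem.List.slice xs none (some (1:Int)) = xs.take 1 := fun xs => by
    simpa using PySem.List.slice_to xs (b := 1) (by norm_num)
  have h3 : ∀ (xs : List Char), PySem.List.slice xs (some (2:Int)) none = xs.drop 2 := fun xs => by
    simpa using PySem.List.slice_from xs (a := 2) (by norm_num)
  have hitems : (PySem.Dict.ofList [(['b'], ['m']), (['c'], ['n','g','h']), (['d'], ['n']),
      (['g'], ['n','g']), (['p'], ['m','h']), (['t'], ['n','h'])]).items
      = [(['b'], ['m']), (['c'], ['n','g','h']), (['d'], ['n']),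
         (['g'], ['n','g']), (['p'], ['m','h']), (['t'], ['n','h'])] := by decide
  intro cs
  rcases cs with _ | ⟨c, rest⟩
  · rfl
  · have hset : (PySem.Set.ofList [['b'], ['c'], ['d'], ['g'], ['p'], ['t']] : PySem.Set (List Char))
        = [['b'], ['c'], ['d'], ['g'], ['p'], ['t']] := by decide
    simp only [nmA, nmB, hset]
    simp only [nmOuter, nmScanMap, nmDigraph, PySem.Chars.startswith, List.isPrefixOf]
    by_cases hb : 'b' = c
    · subst hb
      simp [PySem.Dict.get?, hitems, h1, h2]
    by_cases hc : 'c' = c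
    · subst hc
      rcases rest with _ | ⟨c2, r2⟩
      · simp [PySem.Dict.get?, hitems, h1, h2]
      · by_cases hh : 'h' = c2
        · subst hh; simp [h3]
        · simp [PySem.Dict.get?, hitems, List.find?, h1, h2, hh]
    by_cases hd : 'd' = c
    · subst hd
      rcases rest with _ | ⟨c2, r2⟩
      · simp [PySem.Dict.get?, hitems, h1, h2]
      · by_cases hh : 'd' = c2
        · subst hh; simp [h3]
        · simp [PySem.Dict.get?, hitems, List.find?, h1, h2, hh]
    by_cases hg : 'g' = c
    · subst hg
      simp [PySem.Dict.get?, hitems, h1, h2]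
    by_cases hp : 'p' = c
    · subst hp
      simp [PySem.Dict.get?, hitems, h1, h2]
    by_cases ht : 't' = c
    · subst ht
      rcases rest with _ | ⟨c2, r2⟩
      · simp [PySem.Dict.get?, hitems, h1, h2]
      · by_cases hh : 'h' = c2
        · subst hh; simp [h3]
        · simp [PySem.Dict.get?, hitems, List.find?, h1, h2, hh]
    simp [PySem.Dict.get?, hitems, List.find?, h2,
      show ('b' == c) = false by simp [hb], show ('c' == c) = false by simp [hc],
      show ('d' == c) = false by simp [hd], show ('g' == c) = false by simp [hg],
      show ('p' == c) = false by simp [hp], show ('t' == c) = false by simp [ht]]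

-- ===== VERDICT (by name: the statement is the Claim_ definition above) =====
theorem nasal_mutate_spec : Claim_equal_nasal_mutate := by
  intro word _
  unfold Spec_nasal_mutate nasal_mutate nasal_mutate_alt
  rw [nmA_eq_nmB]
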